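-- pv_equiv track=rewrite | github.com/LeonKennedy/AlgorithmLearning | two_n_pow.py | twoPow
-- ===== SOURCE A (Python) =====
-- def twoPow(s, carry):
--     if len(s) <= 9:
--         return  str(int(s) * 2 + carry)
--     max_int_input = str(int(s[-9:]) * 2 + carry)
--     carry = 0
--     if len(max_int_input) > 9:
--         carry = 1
--         max_int_input = max_int_input[1:]
--
--     out_string =  twoPow(s[0:-9], carry)
--     return out_string + max_int_input
-- ===== SOURCE B (Python) =====
-- def twoPow(s, carry):
--     # iterative: split s into a leftmost base chunk and 9-char trailing chunks,
--     # then run the carry loop right-to-left instead of recursing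
--     chunks = []
--     i = len(s)
--     while i > 9:
--         chunks.append(s[i - 9:i])
--         i -= 9
--     pieces = []
--     for ch in chunks:  # rightmost chunk first
--         t = str(int(ch) * 2 + carry)
--         if len(t) > 9:
--             carry = 1
--             t = t[1:]
--         else:
--             carry = 0
--         pieces.append(t)
--     return str(int(s[0:i]) * 2 + carry) + ''.join(reversed(pieces))
-- ===== Notes on version B (the rewrite author's own statement) =====
-- stated objective: alternative
-- what changed: Replaces A's right-to-left recursion (one Python call frame per 9-digit chunk) by an explicit right-to-left split into 9-char chunks plus an iterative carry loop that collects the doubled pieces and joins them at the end.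
-- outside the precondition, e.g. on twoPow('', 0): A raises ValueError, B raises ValueError; on twoPow('12345678x9', 0): A raises ValueError, B raises ValueError
import Mathlib
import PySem

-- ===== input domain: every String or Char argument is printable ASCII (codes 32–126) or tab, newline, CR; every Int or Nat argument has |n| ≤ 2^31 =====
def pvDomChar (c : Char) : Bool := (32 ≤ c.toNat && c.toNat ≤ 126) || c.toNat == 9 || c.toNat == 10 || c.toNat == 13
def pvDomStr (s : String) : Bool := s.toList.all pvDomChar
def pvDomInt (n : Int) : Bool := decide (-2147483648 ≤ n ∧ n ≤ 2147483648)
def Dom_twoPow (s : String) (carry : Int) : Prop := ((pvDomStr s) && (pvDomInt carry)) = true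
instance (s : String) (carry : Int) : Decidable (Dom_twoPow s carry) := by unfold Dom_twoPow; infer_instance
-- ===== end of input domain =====

-- B replaces A's right-to-left recursion by an iterative chunk split + carry loop (same values; objective: alternative decomposition, avoids Python recursion).
-- ===== PORT A =====
def twoPowL (l : List Char) (carry : Int) : List Char :=
  if _h : l.length ≤ 9 then
    PySem.Int.toChars ((PySem.Int.ofChars? l).getD 0 * 2 + carry)
  else
    -- max_int_input = str(int(s[-9:]) * 2 + carry); carry = 0; if len > 9: carry = 1; drop first char
    let mii := PySem.Int.toChars ((PySem.Int.ofChars? (PySem.List.slice l (some (-9)) none)).getD 0 * 2 + carry)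
    let p : Int × List Char :=
      if 9 < mii.length then (1, PySem.List.slice mii (some 1) none) else (0, mii)
    twoPowL (PySem.List.slice l none (some (-9))) p.1 ++ p.2
termination_by l.length
decreasing_by
  rw [PySem.List.slice_to_neg_ofNat l 9 (by omega)]
  simp; omega

def twoPow (s : String) (carry : Int) : String :=
  String.ofList (twoPowL s.toList carry)

-- ===== PORT B =====
-- the while loop: i = len(s); while i > 9: chunks.append(s[i-9:i]); i -= 9   (returns chunks and final i)
def chunkLoopB (l : List Char) (i : Nat) : List (List Char) × Nat :=
  if 9 < i then
    let rest := chunkLoopB l (i - 9)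
    (PySem.List.slice l (some ((i : Int) - 9)) (some (i : Int)) :: rest.1, rest.2)
  else ([], i)

-- one iteration of the for loop body: t = str(int(ch)*2 + carry); trim/carry
def stepB (carry : Int) (ch : List Char) : Int × List Char :=
  let t := PySem.Int.toChars ((PySem.Int.ofChars? ch).getD 0 * 2 + carry)
  if 9 < t.length then (1, PySem.List.slice t (some 1) none) else (0, t)

def altL (l : List Char) (carry : Int) : List Char :=
  let ci := chunkLoopB l l.length
  let fin := ci.1.foldl (fun st ch => ((stepB st.1 ch).1, st.2 ++ [(stepB st.1 ch).2]))
      (carry, ([] : List (List Char)))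
  PySem.Int.toChars ((PySem.Int.ofChars? (PySem.List.slice l (some 0) (some (ci.2 : Int)))).getD 0 * 2 + fin.1)
    ++ fin.2.reverse.flatten

def twoPow_alt (s : String) (carry : Int) : String :=
  String.ofList (altL s.toList carry)

-- ===== PRECONDITION & SPEC =====
-- length of A's leftmost (base) chunk for a string of length n
def pvBaseLen (n : Nat) : Nat := if n ≤ 9 then n else (n - 10) % 9 + 1

-- Pre_ excludes exactly the inputs where Python's int() raises ValueError on some chunk
-- (in particular the empty string): every 9-char trailing chunk and the base chunk must parse as an int.
def Pre_twoPow (s : String) (carry : Int) : Prop :=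
  (PySem.Int.ofChars? (s.toList.take (pvBaseLen s.toList.length))).isSome = true ∧
  ∀ j : Nat, j < (s.toList.length - pvBaseLen s.toList.length) / 9 →
    (PySem.Int.ofChars? ((s.toList.drop (pvBaseLen s.toList.length + 9 * j)).take 9)).isSome = true
instance (s : String) (carry : Int) : Decidable (Pre_twoPow s carry) := by
  unfold Pre_twoPow; infer_instance

def pvWitness_twoPow : String × Int := ("1234567890", 0)

def Spec_twoPow (s : String) (carry : Int) (out : String) : Prop := out = twoPow_alt s carry
instance (s : String) (carry : Int) (out : String) : Decidable (Spec_twoPow s carry out) := by unfold Spec_twoPow; infer_instance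

-- ===== CLAIM (what is proved, stated in full; the proofs are below) =====
def Claim_equal_twoPow : Prop := ∀ (s : String) (carry : Int), Dom_twoPow s carry → Pre_twoPow s carry → Spec_twoPow s carry (twoPow s carry)

-- ===== LEMMAS AND PROOFS =====

-- the fold function of B's for loop
def pvF : Int × List (List Char) → List Char → Int × List (List Char) :=
  fun st ch => ((stepB st.1 ch).1, st.2 ++ [(stepB st.1 ch).2])

lemma pvF_acc (cs : List (List Char)) (c : Int) (acc : List (List Char)) :
    cs.foldl pvF (c, acc) = ((cs.foldl pvF (c, [])).1, acc ++ (cs.foldl pvF (c, [])).2) := by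
  induction cs generalizing c acc with
  | nil => simp
  | cons ch t ih =>
    simp only [List.foldl_cons, pvF]
    rw [ih _ (acc ++ [(stepB c ch).2]), ih _ ([] ++ [(stepB c ch).2])]
    simp

lemma chunkLoopB_snd_le (l : List Char) (i : Nat) : (chunkLoopB l i).2 ≤ i := by
  induction i using Nat.strong_induction_on with
  | _ i ih =>
    rw [chunkLoopB]
    by_cases h : 9 < i
    · simp only [if_pos h]
      exact le_trans (ih (i - 9) (by omega)) (by omega)
    · simp [h]

lemma chunkLoopB_take (l : List Char) (n : Nat) :
    ∀ i, i ≤ n → chunkLoopB (l.take n) i = chunkLoopB l i := by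
  intro i
  induction i using Nat.strong_induction_on with
  | _ i ih =>
    intro hin
    conv_lhs => rw [chunkLoopB]
    conv_rhs => rw [chunkLoopB]
    by_cases h9 : 9 < i
    · simp only [if_pos h9]
      rw [ih (i - 9) (by omega) (by omega)]
      congr 2
      have h1 : (i : Int) - 9 = ((i - 9 : Nat) : Int) := by omega
      rw [h1, PySem.List.slice_natCast, PySem.List.slice_natCast]
      rw [List.drop_take]
      have h2 : i - (i - 9) = 9 := by omega
      rw [h2, List.take_take]
      have h3 : min 9 (n - (i - 9)) = 9 := by omega
      rw [h3]
    · simp [h9]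

lemma main_eq : ∀ (n : Nat) (l : List Char) (carry : Int), l.length = n →
    twoPowL l carry = altL l carry := by
  intro n
  induction n using Nat.strong_induction_on with
  | _ n ih =>
    intro l carry hn
    by_cases h9 : l.length ≤ 9
    · conv_lhs => rw [twoPowL]
      rw [dif_pos h9, altL]
      conv_rhs => rw [chunkLoopB]
      have h9' : ¬ 9 < l.length := by omega
      simp only [if_neg h9', List.foldl_nil]
      have h0 : (0 : Int) = ((0 : Nat) : Int) := rfl
      rw [h0, PySem.List.slice_natCast]
      simp
    · -- recursive case
      have hdl : (l.drop (l.length - 9)).length = 9 := by simp; omega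
      -- A's side, expressed with stepB
      have hA : twoPowL l carry
          = twoPowL (l.take (l.length - 9)) (stepB carry (l.drop (l.length - 9))).1
            ++ (stepB carry (l.drop (l.length - 9))).2 := by
        conv_lhs => rw [twoPowL]
        rw [dif_neg h9, PySem.List.slice_to_neg_ofNat l 9 (by omega),
            PySem.List.slice_from_neg_ofNat l 9 (by omega)]
        rfl
      -- the head chunk B slices equals A's s[-9:]
      have hch : PySem.List.slice l (some ((l.length : Int) - 9)) (some (l.length : Int))
          = l.drop (l.length - 9) := by
        have h1 : (l.length : Int) - 9 = ((l.length - 9 : Nat) : Int) := by omega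
        rw [h1, PySem.List.slice_natCast]
        have h2 : l.length - (l.length - 9) = 9 := by omega
        rw [h2]
        exact List.take_of_length_le (by omega)
      set q := stepB carry (l.drop (l.length - 9)) with hq
      -- B's side unfolded one chunk
      have hB : altL l carry
          = PySem.Int.toChars
              ((PySem.Int.ofChars? (PySem.List.slice l (some 0)
                  (some ((chunkLoopB l (l.length - 9)).2 : Int)))).getD 0 * 2
                + ((chunkLoopB l (l.length - 9)).1.foldl pvF (q.1, [])).1)
            ++ ((chunkLoopB l (l.length - 9)).1.foldl pvF (q.1, [])).2.reverse.flatten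
            ++ q.2 := by
        rw [altL]
        conv_lhs => rw [chunkLoopB]
        rw [if_pos (by omega : 9 < l.length)]
        simp only [List.foldl_cons]
        rw [show (fun (st : Int × List (List Char)) ch => ((stepB st.1 ch).1, st.2 ++ [(stepB st.1 ch).2])) = pvF from rfl]
        rw [hch, ← hq, pvF_acc]
        simp [List.append_assoc]
      rw [hA, hB, ih (l.length - 9) (by omega) _ q.1 (by simp), altL]
      have htl : (l.take (l.length - 9)).length = l.length - 9 := by simp
      rw [htl, chunkLoopB_take l (l.length - 9) (l.length - 9) (le_refl _)]
      rw [show (fun (st : Int × List (List Char)) ch => ((stepB st.1 ch).1, st.2 ++ [(stepB st.1 ch).2])) = pvF from rfl]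
      -- base chunk of the shorter string is the same slice of l
      have hbase : PySem.List.slice (l.take (l.length - 9)) (some 0)
            (some ((chunkLoopB l (l.length - 9)).2 : Int))
          = PySem.List.slice l (some 0) (some ((chunkLoopB l (l.length - 9)).2 : Int)) := by
        have hle : (chunkLoopB l (l.length - 9)).2 ≤ l.length - 9 := chunkLoopB_snd_le _ _
        have h0 : (0 : Int) = ((0 : Nat) : Int) := rfl
        rw [h0, PySem.List.slice_natCast, PySem.List.slice_natCast]
        simp only [List.drop_zero, Nat.sub_zero]
        rw [List.take_take]
        congr 1
        omega
      rw [hbase]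

-- ===== VERDICT (by name: the statement is the Claim_ definition above) =====
theorem twoPow_spec : Claim_equal_twoPow := by
  intro s carry _ _
  unfold Spec_twoPow twoPow twoPow_alt
  rw [main_eq s.toList.length s.toList carry rfl]
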